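-- pv_equiv track=rewrite | github.com/qiumozhou/-AI | cchess_deep_recognizer.py | compress_fen_row
-- ===== SOURCE A (Python) =====
-- def compress_fen_row(row_chars):
--     """压缩FEN行表示（连续空格用数字表示）"""
--     result = []
--     empty_count = 0
--
--     for char in row_chars:
--         if char in ['.', 'x']:  # 空位
--             empty_count += 1
--         else:  # 棋子
--             if empty_count > 0:
--                 result.append(str(empty_count))
--                 empty_count = 0
--             result.append(char)
--
--     # 处理行尾的空位
--     if empty_count > 0:
--         result.append(str(empty_count))
--
--     # 如果整行为空
--     if not result:
--         return '9'
--
--     return ''.join(result)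
-- ===== SOURCE B (Python) =====
-- def compress_fen_row(row_chars):
--     """Run-based rewrite: scan runs of empty squares with a cursor instead of an accumulate-and-flush counter."""
--     if not row_chars:
--         return '9'
--     out = []
--     i, n = 0, len(row_chars)
--     while i < n:
--         if row_chars[i] in ('.', 'x'):
--             j = i
--             while j < n and row_chars[j] in ('.', 'x'):
--                 j += 1
--             out.append(str(j - i))
--             i = j
--         else:
--             out.append(row_chars[i])
--             i += 1
--     return ''.join(out)
-- ===== Notes on version B (the rewrite author's own statement) =====
-- stated objective: alternative
-- what changed: Replaced the accumulate-and-flush empty-square counter with a run-scanning pass that measures each run of empty squares with an inner cursor and emits its length directly, handling the empty-row case up front.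
import Mathlib
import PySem

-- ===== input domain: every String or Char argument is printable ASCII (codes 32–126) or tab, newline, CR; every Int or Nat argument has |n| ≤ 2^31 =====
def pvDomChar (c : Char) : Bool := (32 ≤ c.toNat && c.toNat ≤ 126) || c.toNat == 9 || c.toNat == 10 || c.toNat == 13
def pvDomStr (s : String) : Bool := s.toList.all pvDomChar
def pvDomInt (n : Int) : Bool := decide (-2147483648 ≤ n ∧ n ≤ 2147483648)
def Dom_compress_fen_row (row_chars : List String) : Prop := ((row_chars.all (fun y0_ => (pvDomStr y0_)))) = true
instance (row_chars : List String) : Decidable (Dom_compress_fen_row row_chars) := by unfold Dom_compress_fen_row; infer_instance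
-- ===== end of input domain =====

-- ===== PORT A =====
-- B compresses each run of empty squares with an inner cursor instead of A's accumulate-and-flush counter; same result, alternative structure.
-- literal transliteration of A: fold over the row with state (result, empty_count); pvFlushA is the 'if empty_count > 0: result.append(str(empty_count))' flush
def pvStepA (st : List String × Int) (c : String) : List String × Int :=
  if c == "." || c == "x" then (st.1, st.2 + 1)
  else
    let r := if st.2 > 0 then st.1 ++ [PySem.Int.toStr st.2] else st.1
    (r ++ [c], 0)

def pvFlushA (st : List String × Int) : List String :=
  if st.2 > 0 then st.1 ++ [PySem.Int.toStr st.2] else st.1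

def compress_fen_row (row_chars : List String) : String :=
  if pvFlushA (row_chars.foldl pvStepA ([], 0)) = [] then "9"
  else String.join (pvFlushA (row_chars.foldl pvStepA ([], 0)))

-- ===== PORT B =====
def pvIsEmptySq (c : String) : Bool := c == "." || c == "x"

-- inner while loop of Source B: length of the leading run of empty squares
def pvRunLen : List String → Nat
  | [] => 0
  | c :: rest => if pvIsEmptySq c then pvRunLen rest + 1 else 0

-- outer while loop of Source B: consume a run of empty squares (emit its length) or a single piece
def pvAltGo : List String → List String
  | [] => []
  | c :: rest =>
    if pvIsEmptySq c then
      PySem.Int.toStr ((pvRunLen rest : Int) + 1) :: pvAltGo (rest.drop (pvRunLen rest))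
    else c :: pvAltGo rest
termination_by l => l.length
decreasing_by
  · exact Nat.lt_succ_of_le (by simpa using List.length_drop_le _ _)
  · simp

def compress_fen_row_alt (row_chars : List String) : String :=
  if row_chars = [] then "9" else String.join (pvAltGo row_chars)

-- ===== PRECONDITION & SPEC =====
def Spec_compress_fen_row (row_chars : List String) (out : String) : Prop := out = compress_fen_row_alt row_chars
instance (row_chars : List String) (out : String) : Decidable (Spec_compress_fen_row row_chars out) := by unfold Spec_compress_fen_row; infer_instance

-- ===== CLAIM (what is proved, stated in full; the proofs are below) =====
def Claim_equal_compress_fen_row : Prop := ∀ (row_chars : List String), Dom_compress_fen_row row_chars → Spec_compress_fen_row row_chars (compress_fen_row row_chars)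

-- ===== LEMMAS AND PROOFS =====

-- what A's loop emits for the remaining input given a pending empty count e
def pvEmit (e : Int) : List String → List String
  | [] => if e > 0 then [PySem.Int.toStr e] else []
  | c :: rest =>
    if pvIsEmptySq c then pvEmit (e + 1) rest
    else (if e > 0 then [PySem.Int.toStr e] else []) ++ c :: pvEmit 0 rest

lemma pvFold_emit (l : List String) : ∀ (acc : List String) (e : Int),
    pvFlushA (l.foldl pvStepA (acc, e)) = acc ++ pvEmit e l := by
  induction l with
  | nil => intro acc e; simp only [List.foldl_nil, pvFlushA, pvEmit]; split <;> simp
  | cons c rest ih =>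
    intro acc e
    by_cases h : pvIsEmptySq c = true
    · have h' : (c == "." || c == "x") = true := h
      simp only [List.foldl_cons, pvStepA, h', if_pos, pvEmit, h]
      exact ih acc (e + 1)
    · have h' : (c == "." || c == "x") = false := by simpa [pvIsEmptySq] using h
      simp only [List.foldl_cons, pvStepA, h', Bool.false_eq_true, if_false, pvEmit, h]
      rw [ih ((if e > 0 then acc ++ [PySem.Int.toStr e] else acc) ++ [c]) 0]
      split <;> simp

lemma pvEmit_eq_altGo (l : List String) :
    (∀ e : Int, 1 ≤ e → pvEmit e l = PySem.Int.toStr (e + (pvRunLen l : Int)) :: pvAltGo (l.drop (pvRunLen l))) ∧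
    pvEmit 0 l = pvAltGo l := by
  induction l with
  | nil =>
    constructor
    · intro e he
      simp [pvEmit, pvRunLen, pvAltGo, show e > 0 by omega]
    · simp [pvEmit, pvAltGo]
  | cons c rest ih =>
    by_cases h : pvIsEmptySq c = true
    · constructor
      · intro e he
        rw [show pvEmit e (c :: rest) = pvEmit (e + 1) rest by simp [pvEmit, h]]
        rw [ih.1 (e + 1) (by omega)]
        simp only [pvRunLen, h, if_pos, List.drop_succ_cons]
        congr 2
        push_cast
        ring
      · rw [show pvEmit 0 (c :: rest) = pvEmit 1 rest by simp [pvEmit, h]]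
        rw [ih.1 1 (by omega)]
        rw [pvAltGo]
        simp only [h, if_pos]
        congr 2
        ring
    · constructor
      · intro e he
        rw [show pvEmit e (c :: rest) = (if e > 0 then [PySem.Int.toStr e] else []) ++ c :: pvEmit 0 rest by
          simp [pvEmit, h]]
        simp [pvAltGo, pvRunLen, h, show e > 0 by omega, ih.2]
      · rw [show pvEmit 0 (c :: rest) = (if (0:Int) > 0 then [PySem.Int.toStr 0] else []) ++ c :: pvEmit 0 rest by
          simp [pvEmit, h]]
        simp [pvAltGo, h, ih.2]

lemma pvAltGo_ne_nil (c : String) (rest : List String) : pvAltGo (c :: rest) ≠ [] := by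
  rw [pvAltGo]; split <;> simp

-- ===== VERDICT (by name: the statement is the Claim_ definition above) =====
theorem compress_fen_row_spec : Claim_equal_compress_fen_row := by
  intro row _
  unfold Spec_compress_fen_row compress_fen_row compress_fen_row_alt
  rw [pvFold_emit row [] 0]
  simp only [List.nil_append, (pvEmit_eq_altGo row).2]
  cases row with
  | nil => simp [pvAltGo]
  | cons c rest => simp [pvAltGo_ne_nil c rest]
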